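-- pv_equiv track=rewrite | github.com/ianlai/Algorithm-Python | algo/_Practice/KT/RectangleFinder2.py | rectangleFinder1
-- ===== SOURCE A (Python) =====
-- def rectangleFinder1(grid):
--     if len(grid) == 0 or len(grid[0]) == 0:
--         return []
--
--     res = []
--     for i in range(len(grid)):
--         for j in range(len(grid[0])):
--             if grid[i][j] == 0:
--                 down, right = i, j
--                 for row in range(i, len(grid)):
--                     if grid[row][j] == 0:
--                         down = row
--                 for col in range(j, len(grid[0])):
--                     if grid[i][col] == 0:
--                         right = col
--                 res.append((i, j))
--                 res.append((down, right))
--                 return res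
--     return res
-- ===== SOURCE B (Python) =====
-- def rectangleFinder1(grid):
--     if not grid or not grid[0]:
--         return []
--     C = len(grid[0])
--     zeros = [(r, c) for r in range(len(grid)) for c in range(C) if grid[r][c] == 0]
--     if not zeros:
--         return []
--     i, j = min(zeros)
--     down = max(r for r, c in zeros if c == j)
--     right = max(c for r, c in zeros if r == i)
--     return [(i, j), (down, right)]
-- ===== Notes on version B (the rewrite author's own statement) =====
-- stated objective: alternative
-- what changed: B builds the list of all zero coordinates in one sweep and then answers with aggregate queries - lexicographic min for the first zero and max over the column/row fibres for the extent - replacing A's early-return nested scan plus two dedicated forward extent scans.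
-- outside the precondition, e.g. on rectangleFinder1([[0, 1], [5]]): A returns [(0, 0), (0, 0)], B raises IndexError
import Mathlib
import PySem

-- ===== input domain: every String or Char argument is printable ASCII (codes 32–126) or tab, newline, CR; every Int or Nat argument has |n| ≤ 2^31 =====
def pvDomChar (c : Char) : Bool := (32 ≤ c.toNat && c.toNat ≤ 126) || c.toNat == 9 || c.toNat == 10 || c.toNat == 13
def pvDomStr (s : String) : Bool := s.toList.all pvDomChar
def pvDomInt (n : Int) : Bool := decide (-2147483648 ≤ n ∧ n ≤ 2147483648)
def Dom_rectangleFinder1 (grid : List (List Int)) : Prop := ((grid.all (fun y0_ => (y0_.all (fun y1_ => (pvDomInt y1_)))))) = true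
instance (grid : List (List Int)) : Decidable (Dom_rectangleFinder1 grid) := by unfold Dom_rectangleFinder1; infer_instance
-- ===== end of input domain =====

-- B collects every zero coordinate in one sweep and answers with aggregate queries
-- (lexicographic min, fibre-wise max) instead of A's early-return nested scans (alternative).

-- ===== PORT A =====
-- inner `for j in range(len(grid[0]))` loop of the first-zero search
def aFindJ (grid : List (List Int)) (i C j : Nat) : Option Nat :=
  if _h : j < C then
    if (grid.getD i []).getD j 0 = 0 then some j
    else aFindJ grid i C (j + 1)
  else none
termination_by C - j

-- outer `for i in range(len(grid))` loop of the first-zero search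
def aFindI (grid : List (List Int)) (C i : Nat) : Option (Nat × Nat) :=
  if _h : i < grid.length then
    match aFindJ grid i C 0 with
    | some j => some (i, j)
    | none => aFindI grid C (i + 1)
  else none
termination_by grid.length - i

-- `for row in range(i, len(grid)): if grid[row][j] == 0: down = row`
def aDown (grid : List (List Int)) (j R row down : Nat) : Nat :=
  if _h : row < R then
    aDown grid j R (row + 1) (if (grid.getD row []).getD j 0 = 0 then row else down)
  else down
termination_by R - row

-- `for col in range(j, len(grid[0])): if grid[i][col] == 0: right = col`
def aRight (grid : List (List Int)) (i C col right : Nat) : Nat :=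
  if _h : col < C then
    aRight grid i C (col + 1) (if (grid.getD i []).getD col 0 = 0 then col else right)
  else right
termination_by C - col

def rectangleFinder1 (grid : List (List Int)) : List (Int × Int) :=
  if grid.length = 0 ∨ (grid.headD []).length = 0 then []
  else
    match aFindI grid (grid.headD []).length 0 with
    | none => []
    | some (i, j) =>
      [((i : Int), (j : Int)),
       ((aDown grid j grid.length i i : Int), (aRight grid i (grid.headD []).length j j : Int))]

-- ===== PORT B =====
-- `zeros = [(r, c) for r in range(len(grid)) for c in range(C) if grid[r][c] == 0]`
def bZeros (grid : List (List Int)) (C : Nat) : List (Nat × Nat) :=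
  (List.range grid.length).flatMap (fun r =>
    (List.range C).filterMap (fun c =>
      if (grid.getD r []).getD c 0 = 0 then some (r, c) else none))

def rectangleFinder1_alt (grid : List (List Int)) : List (Int × Int) :=
  match grid with
  | [] => []
  | row0 :: _ =>
    if row0.isEmpty then []
    else
      let zeros := bZeros grid row0.length
      if zeros.isEmpty then []
      else
        -- `i, j = min(zeros)`: Python's min of tuples is the lexicographic minimum
        match PySem.List.min2? zeros Prod.fst Prod.snd with
        | none => []  -- unreachable: zeros is nonempty here
        | some (i, j) =>
          -- `max(r for r, c in zeros if c == j)` / `max(c for r, c in zeros if r == i)`;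
          -- the generators provably contain i resp. j, so the defaults are unreachable
          let down := (PySem.List.max? ((zeros.filter (fun p => p.2 == j)).map Prod.fst) (fun x => x)).getD i
          let right := (PySem.List.max? ((zeros.filter (fun p => p.1 == i)).map Prod.snd) (fun x => x)).getD j
          [((i : Int), (j : Int)), ((down : Int), (right : Int))]

-- ===== PRECONDITION & SPEC =====
-- Pre_ excludes ragged grids with a row shorter than the first row: on those A's column scan
-- (and B's full sweep) can hit an IndexError.
def Pre_rectangleFinder1 (grid : List (List Int)) : Prop :=
  ∀ row ∈ grid, (grid.headD []).length ≤ row.length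
instance (grid : List (List Int)) : Decidable (Pre_rectangleFinder1 grid) := by
  unfold Pre_rectangleFinder1; infer_instance

def pvWitness_rectangleFinder1 : List (List Int) := [[1, 0], [0, 1]]

def Spec_rectangleFinder1 (grid : List (List Int)) (out : List (Int × Int)) : Prop := out = rectangleFinder1_alt grid
instance (grid : List (List Int)) (out : List (Int × Int)) : Decidable (Spec_rectangleFinder1 grid out) := by unfold Spec_rectangleFinder1; infer_instance

-- ===== CLAIM (what is proved, stated in full; the proofs are below) =====
def Claim_equal_rectangleFinder1 : Prop := ∀ (grid : List (List Int)), Dom_rectangleFinder1 grid → Pre_rectangleFinder1 grid → Spec_rectangleFinder1 grid (rectangleFinder1 grid)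

-- ===== LEMMAS AND PROOFS =====

-- membership in B's zero list
theorem mem_bZeros (grid : List (List Int)) (C r c : Nat) :
    (r, c) ∈ bZeros grid C ↔
      r < grid.length ∧ c < C ∧ (grid.getD r []).getD c 0 = 0 := by
  simp only [bZeros, List.mem_flatMap, List.mem_filterMap, List.mem_range]
  constructor
  · rintro ⟨r', hr', c', hc', h⟩
    split_ifs at h with hz
    all_goals simp only [Option.some.injEq, Prod.mk.injEq] at h
    obtain ⟨h1, h2⟩ := h
    subst h1; subst h2
    exact ⟨hr', hc', hz⟩
  · rintro ⟨hr, hc, hz⟩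
    exact ⟨r, hr, c, hc, by rw [if_pos hz]⟩

-- peel the first fold step of Python's lexicographic min of tuples
theorem min2?_cons_cons (x y : Nat × Nat) (t : List (Nat × Nat)) :
    PySem.List.min2? (x :: y :: t) Prod.fst Prod.snd =
      PySem.List.min2?
        ((if (decide (y.1 < x.1) || !decide (x.1 < y.1) && decide (y.2 < x.2)) = true
          then y else x) :: t) Prod.fst Prod.snd := by
  simp only [PySem.List.min2?, List.foldl_cons]
  split_ifs with h <;> rfl

-- Python's min over a nonempty list of pairs: some member, lexicographically ≤ every member
theorem min2?_min_spec : ∀ (t : List (Nat × Nat)) (x : Nat × Nat), ∃ m,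
    PySem.List.min2? (x :: t) Prod.fst Prod.snd = some m ∧ m ∈ x :: t ∧
      ∀ y ∈ x :: t, m.1 < y.1 ∨ (m.1 = y.1 ∧ m.2 ≤ y.2) := by
  intro t
  induction t with
  | nil =>
    intro x
    refine ⟨x, rfl, List.mem_cons_self, ?_⟩
    intro y hy
    rcases List.mem_cons.mp hy with h | h
    · subst h; exact Or.inr ⟨rfl, le_refl _⟩
    · simp at h
  | cons y t ih =>
    intro x
    rw [min2?_cons_cons x y t]
    by_cases hc : (decide (y.1 < x.1) || !decide (x.1 < y.1) && decide (y.2 < x.2)) = true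
    · rw [if_pos hc]
      obtain ⟨m, hm, hmem, hall⟩ := ih y
      simp only [decide_eq_true_eq, Bool.or_eq_true, Bool.and_eq_true,
        Bool.not_eq_true', decide_eq_false_iff_not] at hc
      have hmy := hall y List.mem_cons_self
      refine ⟨m, hm, ?_, ?_⟩
      · rcases List.mem_cons.mp hmem with h | h
        · subst h; exact List.mem_cons_of_mem _ List.mem_cons_self
        · exact List.mem_cons_of_mem _ (List.mem_cons_of_mem _ h)
      · intro z hz
        rcases List.mem_cons.mp hz with hz | hz
        · subst hz
          rcases hmy with h1 | ⟨h1, h2⟩ <;> rcases hc with h3 | ⟨h3, h4⟩ <;> omega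
        · exact hall z hz
    · rw [if_neg hc]
      obtain ⟨m, hm, hmem, hall⟩ := ih x
      simp only [decide_eq_true_eq, Bool.or_eq_true, Bool.and_eq_true,
        Bool.not_eq_true', decide_eq_false_iff_not] at hc
      have hmx := hall x List.mem_cons_self
      refine ⟨m, hm, ?_, ?_⟩
      · rcases List.mem_cons.mp hmem with h | h
        · subst h; exact List.mem_cons_self
        · exact List.mem_cons_of_mem _ (List.mem_cons_of_mem _ h)
      · intro z hz
        rcases List.mem_cons.mp hz with hz | hz
        · subst hz; exact hmx
        · rcases List.mem_cons.mp hz with hz | hz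
          · subst hz
            rcases hmx with h1 | ⟨h1, h2⟩ <;> omega
          · exact hall z (List.mem_cons_of_mem _ hz)

-- A's inner loop, success case
theorem aFindJ_some_spec (grid : List (List Int)) (i C : Nat) :
    ∀ n j0 j, C - j0 = n → aFindJ grid i C j0 = some j →
      j0 ≤ j ∧ j < C ∧ (grid.getD i []).getD j 0 = 0 ∧
        ∀ c, j0 ≤ c → c < j → (grid.getD i []).getD c 0 ≠ 0 := by
  intro n
  induction n with
  | zero =>
    intro j0 j h hfind
    rw [aFindJ, dif_neg (by omega)] at hfind
    exact absurd hfind (by simp)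
  | succ n ih =>
    intro j0 j h hfind
    have hj0 : j0 < C := by
      by_contra hc
      rw [aFindJ, dif_neg hc] at hfind
      exact absurd hfind (by simp)
    rw [aFindJ, dif_pos hj0] at hfind
    by_cases hz : (grid.getD i []).getD j0 0 = 0
    · rw [if_pos hz] at hfind
      simp only [Option.some.injEq] at hfind
      subst hfind
      exact ⟨le_refl _, hj0, hz, fun c hc1 hc2 => by omega⟩
    · rw [if_neg hz] at hfind
      obtain ⟨h1, h2, h3, h4⟩ := ih (j0 + 1) j (by omega) hfind
      refine ⟨by omega, h2, h3, ?_⟩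
      intro c hc1 hc2
      by_cases hcj : c = j0
      · exact hcj ▸ hz
      · exact h4 c (by omega) hc2

-- A's inner loop, failure case
theorem aFindJ_none_spec (grid : List (List Int)) (i C : Nat) :
    ∀ n j0, C - j0 = n → aFindJ grid i C j0 = none →
      ∀ c, j0 ≤ c → c < C → (grid.getD i []).getD c 0 ≠ 0 := by
  intro n
  induction n with
  | zero =>
    intro j0 h _ c hc1 hc2
    omega
  | succ n ih =>
    intro j0 h hfind c hc1 hc2
    have hj0 : j0 < C := by omega
    rw [aFindJ, dif_pos hj0] at hfind
    by_cases hz : (grid.getD i []).getD j0 0 = 0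
    · rw [if_pos hz] at hfind; exact absurd hfind (by simp)
    · rw [if_neg hz] at hfind
      by_cases hcj : c = j0
      · exact hcj ▸ hz
      · exact ih (j0 + 1) (by omega) hfind c (by omega) hc2

-- A's outer loop, failure case
theorem aFindI_none_spec (grid : List (List Int)) (C : Nat) :
    ∀ n i0, grid.length - i0 = n → aFindI grid C i0 = none →
      ∀ r c, i0 ≤ r → r < grid.length → c < C → (grid.getD r []).getD c 0 ≠ 0 := by
  intro n
  induction n with
  | zero =>
    intro i0 h _ r c hr1 hr2 _
    omega
  | succ n ih =>
    intro i0 h hfind r c hr1 hr2 hc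
    have hi0 : i0 < grid.length := by omega
    rw [aFindI, dif_pos hi0] at hfind
    cases hJ : aFindJ grid i0 C 0 with
    | some j => rw [hJ] at hfind; exact absurd hfind (by simp)
    | none =>
      rw [hJ] at hfind
      by_cases hri : r = i0
      · subst hri
        exact aFindJ_none_spec grid r C C 0 (by omega) hJ c (by omega) hc
      · exact ih (i0 + 1) (by omega) hfind r c (by omega) hr2 hc

-- A's outer loop, success case: the row-major-first zero
theorem aFindI_some_spec (grid : List (List Int)) (C : Nat) :
    ∀ n i0 i j, grid.length - i0 = n → aFindI grid C i0 = some (i, j) →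
      i0 ≤ i ∧ i < grid.length ∧ j < C ∧ (grid.getD i []).getD j 0 = 0 ∧
        (∀ c, c < j → (grid.getD i []).getD c 0 ≠ 0) ∧
        (∀ r c, i0 ≤ r → r < i → c < C → (grid.getD r []).getD c 0 ≠ 0) := by
  intro n
  induction n with
  | zero =>
    intro i0 i j h hfind
    rw [aFindI, dif_neg (by omega)] at hfind
    exact absurd hfind (by simp)
  | succ n ih =>
    intro i0 i j h hfind
    have hi0 : i0 < grid.length := by omega
    rw [aFindI, dif_pos hi0] at hfind
    cases hJ : aFindJ grid i0 C 0 with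
    | some j' =>
      rw [hJ] at hfind
      simp only [Option.some.injEq, Prod.mk.injEq] at hfind
      obtain ⟨h1, h2⟩ := hfind
      subst h1; subst h2
      obtain ⟨_, hjC, hz, hbef⟩ := aFindJ_some_spec grid i0 C C 0 j' (by omega) hJ
      exact ⟨le_refl _, hi0, hjC, hz, fun c hc => hbef c (by omega) hc,
        fun r c hr1 hr2 _ => by omega⟩
    | none =>
      rw [hJ] at hfind
      obtain ⟨h1, h2, h3, h4, h5, h6⟩ := ih (i0 + 1) i j (by omega) hfind
      refine ⟨by omega, h2, h3, h4, h5, ?_⟩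
      intro r c hr1 hr2 hc
      by_cases hri : r = i0
      · subst hri
        exact aFindJ_none_spec grid r C C 0 (by omega) hJ c (by omega) hc
      · exact h6 r c (by omega) hr2 hc

-- the down scan either keeps its accumulator or lands on a zero row
theorem aDown_cases (grid : List (List Int)) (j R : Nat) :
    ∀ n row down, R - row = n →
      aDown grid j R row down = down ∨
        (row ≤ aDown grid j R row down ∧ aDown grid j R row down < R ∧
          (grid.getD (aDown grid j R row down) []).getD j 0 = 0) := by
  intro n
  induction n with
  | zero =>
    intro row down h
    rw [aDown, dif_neg (by omega)]
    exact Or.inl rfl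
  | succ n ih =>
    intro row down h
    have hrow : row < R := by omega
    rw [aDown, dif_pos hrow]
    by_cases hz : (grid.getD row []).getD j 0 = 0
    · rw [if_pos hz]
      rcases ih (row + 1) row (by omega) with h' | ⟨h1, h2, h3⟩
      · exact Or.inr ⟨by omega, by rw [h']; omega, by rw [h']; exact hz⟩
      · exact Or.inr ⟨by omega, h2, h3⟩
    · rw [if_neg hz]
      rcases ih (row + 1) down (by omega) with h' | ⟨h1, h2, h3⟩
      · exact Or.inl h'
      · exact Or.inr ⟨by omega, h2, h3⟩

-- every zero row in [row, R) is ≤ the down scan's result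
theorem aDown_ub (grid : List (List Int)) (j R : Nat) :
    ∀ n row down, R - row = n →
      ∀ r, row ≤ r → r < R → (grid.getD r []).getD j 0 = 0 →
        r ≤ aDown grid j R row down := by
  intro n
  induction n with
  | zero => intro row down h r hr1 hr2 _; omega
  | succ n ih =>
    intro row down h r hr1 hr2 hz
    have hrow : row < R := by omega
    rw [aDown, dif_pos hrow]
    by_cases hri : r = row
    · subst hri
      rw [if_pos hz]
      rcases aDown_cases grid j R (R - (r + 1)) (r + 1) r rfl with h' | ⟨h1, _, _⟩
      · omega
      · omega
    · exact ih (row + 1) _ (by omega) r (by omega) hr2 hz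

-- the right scan: same two facts along the row
theorem aRight_cases (grid : List (List Int)) (i C : Nat) :
    ∀ n col right, C - col = n →
      aRight grid i C col right = right ∨
        (col ≤ aRight grid i C col right ∧ aRight grid i C col right < C ∧
          (grid.getD i []).getD (aRight grid i C col right) 0 = 0) := by
  intro n
  induction n with
  | zero =>
    intro col right h
    rw [aRight, dif_neg (by omega)]
    exact Or.inl rfl
  | succ n ih =>
    intro col right h
    have hcol : col < C := by omega
    rw [aRight, dif_pos hcol]
    by_cases hz : (grid.getD i []).getD col 0 = 0
    · rw [if_pos hz]
      rcases ih (col + 1) col (by omega) with h' | ⟨h1, h2, h3⟩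
      · exact Or.inr ⟨by omega, by rw [h']; omega, by rw [h']; exact hz⟩
      · exact Or.inr ⟨by omega, h2, h3⟩
    · rw [if_neg hz]
      rcases ih (col + 1) right (by omega) with h' | ⟨h1, h2, h3⟩
      · exact Or.inl h'
      · exact Or.inr ⟨by omega, h2, h3⟩

theorem aRight_ub (grid : List (List Int)) (i C : Nat) :
    ∀ n col right, C - col = n →
      ∀ c, col ≤ c → c < C → (grid.getD i []).getD c 0 = 0 →
        c ≤ aRight grid i C col right := by
  intro n
  induction n with
  | zero => intro col right h c hc1 hc2 _; omega
  | succ n ih =>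
    intro col right h c hc1 hc2 hz
    have hcol : col < C := by omega
    rw [aRight, dif_pos hcol]
    by_cases hci : c = col
    · subst hci
      rw [if_pos hz]
      rcases aRight_cases grid i C (C - (c + 1)) (c + 1) c rfl with h' | ⟨h1, _, _⟩
      · omega
      · omega
    · exact ih (col + 1) _ (by omega) c (by omega) hc2 hz

-- ===== VERDICT (by name: the statement is the Claim_ definition above) =====
theorem rectangleFinder1_spec : Claim_equal_rectangleFinder1 := by
  intro grid _dom _hpre
  unfold Spec_rectangleFinder1
  cases grid with
  | nil => rfl
  | cons row0 rest =>
  simp only [rectangleFinder1, rectangleFinder1_alt, List.headD_cons]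
  by_cases h0 : row0.length = 0
  · rw [if_pos (Or.inr h0), if_pos (by simpa [List.isEmpty_iff, ← List.length_eq_zero_iff] using h0)]
  · rw [if_neg (by simp [h0]), if_neg (by simp [List.isEmpty_iff, ← List.length_eq_zero_iff, h0])]
    set g := row0 :: rest with hg
    set C := row0.length with hC
    cases hF : aFindI g C 0 with
    | none =>
      have hempty : bZeros g C = [] := by
        rw [List.eq_nil_iff_forall_not_mem]
        rintro ⟨r, c⟩ hmem
        obtain ⟨hr, hc, hz⟩ := (mem_bZeros g C r c).mp hmem
        exact aFindI_none_spec g C g.length 0 (by omega) hF r c (by omega) hr hc hz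
      rw [hempty]
      simp
    | some p =>
      obtain ⟨i, j⟩ := p
      obtain ⟨-, hiR, hjC, hz, hrowmin, hprev⟩ := aFindI_some_spec g C g.length 0 i j (by omega) hF
      have hij_mem : (i, j) ∈ bZeros g C := (mem_bZeros g C i j).mpr ⟨hiR, hjC, hz⟩
      have hne : bZeros g C ≠ [] := fun h => by rw [h] at hij_mem; exact absurd hij_mem (by simp)
      rw [if_neg (by simpa [List.isEmpty_iff] using hne)]
      obtain ⟨z0, zt, hzs⟩ : ∃ z0 zt, bZeros g C = z0 :: zt := by
        cases h : bZeros g C with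
        | nil => exact absurd h hne
        | cons a b => exact ⟨a, b, rfl⟩
      obtain ⟨m, hm0, hmem0, hmin0⟩ := min2?_min_spec zt z0
      have hm : PySem.List.min2? (bZeros g C) Prod.fst Prod.snd = some m := by
        rw [hzs]; exact hm0
      have hm_mem : m ∈ bZeros g C := by rw [hzs]; exact hmem0
      have hm_min : ∀ y ∈ bZeros g C, m.1 < y.1 ∨ (m.1 = y.1 ∧ m.2 ≤ y.2) := by
        rw [hzs]; exact hmin0
      rw [hm]
      -- (i, j) is the lexicographic minimum of the zero list
      have hmin_ij : ∀ y ∈ bZeros g C, i < y.1 ∨ (i = y.1 ∧ j ≤ y.2) := by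
        rintro ⟨r, c⟩ hy
        obtain ⟨hr, hc, hzy⟩ := (mem_bZeros g C r c).mp hy
        by_cases hri : r < i
        · exact absurd hzy (hprev r c (by omega) hri hc)
        · by_cases hrieq : r = i
          · subst hrieq
            by_cases hcj : c < j
            · exact absurd hzy (hrowmin c hcj)
            · exact Or.inr ⟨rfl, by omega⟩
          · exact Or.inl (by omega)
      have hmij : m = (i, j) := by
        have h1 := hm_min (i, j) hij_mem
        have h2 := hmin_ij m hm_mem
        obtain ⟨m1, m2⟩ := m
        simp only at h1 h2
        have : m1 = i ∧ m2 = j := by omega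
        simp [this.1, this.2]
      subst hmij
      -- the down extent
      have hdown : aDown g j g.length i i =
          (PySem.List.max? (((bZeros g C).filter (fun p => p.2 == j)).map Prod.fst)
            (fun x => x)).getD i := by
        have hmemcol : ∀ r : Nat,
            r ∈ ((bZeros g C).filter (fun p => p.2 == j)).map Prod.fst ↔
              r < g.length ∧ (g.getD r []).getD j 0 = 0 := by
          intro r
          simp only [List.mem_map, List.mem_filter]
          constructor
          · rintro ⟨⟨r', c'⟩, ⟨hmem, hbeq⟩, hfst⟩
            simp only [beq_iff_eq] at hbeq
            simp only at hfst
            obtain ⟨h1, h2, h3⟩ := (mem_bZeros g C r' c').mp hmem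
            rw [← hfst, ← hbeq]
            exact ⟨h1, h3⟩
          · rintro ⟨h1, h2⟩
            exact ⟨(r, j), ⟨(mem_bZeros g C r j).mpr ⟨h1, hjC, h2⟩, by simp⟩, rfl⟩
        have hi_mem : i ∈ ((bZeros g C).filter (fun p => p.2 == j)).map Prod.fst :=
          (hmemcol i).mpr ⟨hiR, hz⟩
        cases hmx : PySem.List.max? (((bZeros g C).filter (fun p => p.2 == j)).map Prod.fst)
            (fun x => x) with
        | none =>
          rw [PySem.List.max?_eq_none_iff] at hmx
          rw [hmx] at hi_mem
          exact absurd hi_mem (by simp)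
        | some d =>
          simp only [Option.getD_some]
          obtain ⟨hd1, hd2⟩ := (hmemcol d).mp (PySem.List.max?_mem hmx)
          have hd_ge_i : i ≤ d := by
            have := hmin_ij (d, j) ((mem_bZeros g C d j).mpr ⟨hd1, hjC, hd2⟩)
            simp only at this
            omega
          have h_le : aDown g j g.length i i ≤ d := by
            rcases aDown_cases g j g.length (g.length - i) i i rfl with h' | ⟨ha1, ha2, ha3⟩
            · omega
            · exact PySem.List.max?_isMax hmx _ ((hmemcol _).mpr ⟨ha2, ha3⟩)
          have h_ge : d ≤ aDown g j g.length i i :=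
            aDown_ub g j g.length (g.length - i) i i rfl d hd_ge_i hd1 hd2
          omega
      -- the right extent
      have hright : aRight g i C j j =
          (PySem.List.max? (((bZeros g C).filter (fun p => p.1 == i)).map Prod.snd)
            (fun x => x)).getD j := by
        have hmemrow : ∀ c : Nat,
            c ∈ ((bZeros g C).filter (fun p => p.1 == i)).map Prod.snd ↔
              c < C ∧ (g.getD i []).getD c 0 = 0 := by
          intro c
          simp only [List.mem_map, List.mem_filter]
          constructor
          · rintro ⟨⟨r', c'⟩, ⟨hmem, hbeq⟩, hsnd⟩
            simp only [beq_iff_eq] at hbeq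
            simp only at hsnd
            obtain ⟨h1, h2, h3⟩ := (mem_bZeros g C r' c').mp hmem
            rw [← hsnd, ← hbeq]
            exact ⟨h2, h3⟩
          · rintro ⟨h1, h2⟩
            exact ⟨(i, c), ⟨(mem_bZeros g C i c).mpr ⟨hiR, h1, h2⟩, by simp⟩, rfl⟩
        have hj_mem : j ∈ ((bZeros g C).filter (fun p => p.1 == i)).map Prod.snd :=
          (hmemrow j).mpr ⟨hjC, hz⟩
        cases hmx : PySem.List.max? (((bZeros g C).filter (fun p => p.1 == i)).map Prod.snd)
            (fun x => x) with
        | none =>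
          rw [PySem.List.max?_eq_none_iff] at hmx
          rw [hmx] at hj_mem
          exact absurd hj_mem (by simp)
        | some d =>
          simp only [Option.getD_some]
          obtain ⟨hd1, hd2⟩ := (hmemrow d).mp (PySem.List.max?_mem hmx)
          have hd_ge_j : j ≤ d := by
            have := hmin_ij (i, d) ((mem_bZeros g C i d).mpr ⟨hiR, hd1, hd2⟩)
            simp only at this
            omega
          have h_le : aRight g i C j j ≤ d := by
            rcases aRight_cases g i C (C - j) j j rfl with h' | ⟨ha1, ha2, ha3⟩
            · omega
            · exact PySem.List.max?_isMax hmx _ ((hmemrow _).mpr ⟨ha2, ha3⟩)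
          have h_ge : d ≤ aRight g i C j j :=
            aRight_ub g i C (C - j) j j rfl d hd_ge_j hd1 hd2
          omega
      simp only [hdown, hright]
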